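-- pv_equiv track=rewrite | github.com/yoderw/CSHW | pr/pr2/ciphers/ciphers.py | combine_split
-- ===== SOURCE A (Python) =====
-- def combine_split(split):
--     s = ""
--     length = len([j for i in range(len(split)) for j in split[i]])
--     i = 0
--     j = 0
--     for n in range(length):
--         if i == len(split):
--             i = 0
--             j += 1
--         s += split[i][j]
--         i += 1
--     return s
-- ===== SOURCE B (Python) =====
-- def combine_split(split):
--     width = max((len(r) for r in split), default=0)
--     return "".join(r[j] for j in range(width) for r in split if j < len(r))
-- ===== Notes on version B (the rewrite author's own statement) =====
-- stated objective: simpler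
-- what changed: B replaces A's flat counter loop (which emulates column/row nesting by manually resetting i and bumping j) with a direct column-major comprehension guarded by row length, joined once; Pre_ excludes exactly the ragged inputs on which A raises IndexError.
import Mathlib
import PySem

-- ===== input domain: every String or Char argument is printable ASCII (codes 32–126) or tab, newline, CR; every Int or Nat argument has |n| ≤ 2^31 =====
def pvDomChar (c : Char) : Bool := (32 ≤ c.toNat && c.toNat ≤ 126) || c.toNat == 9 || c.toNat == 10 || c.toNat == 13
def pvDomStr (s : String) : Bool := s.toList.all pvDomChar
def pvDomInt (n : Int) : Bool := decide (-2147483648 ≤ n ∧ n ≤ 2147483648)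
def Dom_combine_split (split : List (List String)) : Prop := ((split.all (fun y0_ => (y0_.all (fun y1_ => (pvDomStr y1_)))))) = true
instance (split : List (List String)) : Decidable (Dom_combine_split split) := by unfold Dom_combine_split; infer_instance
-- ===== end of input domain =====

-- B replaces A's flat counter loop with manual row-index reset by an explicit column-major
-- comprehension guarded by row length (objective: simpler); on ragged inputs where A raises
-- IndexError (excluded by Pre_), B returns the full column-major concatenation.

-- ===== PORT A =====
-- Literal port of A.  Indices are the nonnegative i, j of the Python loop; inside
-- Pre_combine_split every access split[i][j] is in range, so it ports as getD
-- (out-of-range = IndexError is exactly what Pre_combine_split excludes).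
def combine_split (split : List (List String)) : String :=
  -- length = len([j for i in range(len(split)) for j in split[i]])
  let length := ((List.range split.length).flatMap (fun i => split.getD i [])).length
  -- for n in range(length): if i == len(split): i = 0; j += 1;  s += split[i][j];  i += 1
  ((List.range length).foldl
      (fun (st : String × Nat × Nat) _ =>
        let (s, i, j) := st
        let (i, j) := if i = split.length then (0, j + 1) else (i, j)
        (s ++ ((split.getD i []).getD j ""), i + 1, j))
      ("", 0, 0)).1

-- ===== PORT B =====
-- width = max((len(r) for r in split), default=0)
-- "".join(r[j] for j in range(width) for r in split if j < len(r))   (r[j] guarded, so getD exact)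
def combine_split_alt (split : List (List String)) : String :=
  let width := split.foldl (fun m r => max m r.length) 0
  String.join ((List.range width).flatMap (fun j =>
    (split.filter (fun r => j < r.length)).map (fun r => r.getD j "")))

-- ===== PRECONDITION & SPEC =====
-- Pre_ is exactly the set of inputs on which the Python A returns (anywhere else A raises
-- IndexError on a too-short row): row i must have length total/n, plus one for the first
-- total%n rows — the unique row-length pattern under which A's flat column-major walk
-- never indexes past the end of a row.
def Pre_combine_split (split : List (List String)) : Prop :=
  ∀ i < split.length,
    (split.getD i []).length =
      (split.flatMap id).length / split.length +
        (if i < (split.flatMap id).length % split.length then 1 else 0)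
instance (split : List (List String)) : Decidable (Pre_combine_split split) := by
  unfold Pre_combine_split; infer_instance

def pvWitness_combine_split : List (List String) := [["a", "b"], ["c"]]

def Spec_combine_split (split : List (List String)) (out : String) : Prop := out = combine_split_alt split
instance (split : List (List String)) (out : String) : Decidable (Spec_combine_split split out) := by unfold Spec_combine_split; infer_instance

-- ===== CLAIM (what is proved, stated in full; the proofs are below) =====
def Claim_equal_combine_split : Prop := ∀ (split : List (List String)), Dom_combine_split split → Pre_combine_split split → Spec_combine_split split (combine_split split)

-- ===== LEMMAS AND PROOFS =====

-- basic String.join algebra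
theorem pvFoldlApp (l : List String) : ∀ a b : String,
    List.foldl (fun r s => r ++ s) (a ++ b) l = a ++ List.foldl (fun r s => r ++ s) b l := by
  induction l with
  | nil => intro a b; rfl
  | cons x t ih => intro a b; simpa [String.append_assoc] using ih a (b ++ x)

theorem pvJoinCons (x : String) (l : List String) : String.join (x :: l) = x ++ String.join l := by
  simpa using pvFoldlApp l x ""

theorem pvJoinAppend (a b : List String) :
    String.join (a ++ b) = String.join a ++ String.join b := by
  induction a with
  | nil => simp [String.join]
  | cons x t ih => simp [pvJoinCons, ih, String.append_assoc]

-- the flat comprehension of A is the flatten of split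
theorem pvMapGetDRange (l : List (List String)) :
    (List.range l.length).map (fun i => l.getD i []) = l := by
  apply List.ext_getElem
  · simp
  · intro i h1 h2
    simp [List.getD_eq_getElem?_getD, List.getElem?_eq_getElem h2]

theorem pvFlatEq (split : List (List String)) :
    (List.range split.length).flatMap (fun i => split.getD i []) = split.flatMap id := by
  rw [List.flatMap_def, pvMapGetDRange, List.flatMap_id]

-- one column of a list of rows, as a string
def pvColJoin (l : List (List String)) (j : Nat) : String :=
  String.join (l.map (fun r => r.getD j ""))

-- the first c full columns of split
def pvCols (split : List (List String)) : Nat → String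
  | 0 => ""
  | c + 1 => pvCols split c ++ pvColJoin split c

-- head/tail decompositions
theorem pvColJoinEq (l : List (List String)) (hl : 0 < l.length) (j : Nat) :
    pvColJoin l j =
      (l.getD 0 []).getD j "" ++ String.join ((l.drop 1).map (fun r => r.getD j "")) := by
  cases l with
  | nil => simp at hl
  | cons x t => simp [pvColJoin, pvJoinCons, List.getD]

theorem pvTakeCons (l : List (List String)) (hl : 0 < l.length) (r : Nat) (hr : 0 < r) :
    l.take r = l.getD 0 [] :: (l.drop 1).take (r - 1) := by
  cases l with
  | nil => simp at hl
  | cons x t =>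
      cases r with
      | zero => omega
      | succ r => simp [List.getD]

-- one step of A's loop body
def pvStep1 (split : List (List String)) (st : String × Nat × Nat) : String × Nat × Nat :=
  let (s, i, j) := st
  let (i, j) := if i = split.length then (0, j + 1) else (i, j)
  (s ++ ((split.getD i []).getD j ""), i + 1, j)

def pvStepN (split : List (List String)) : Nat → (String × Nat × Nat) → String × Nat × Nat
  | 0, st => st
  | k + 1, st => pvStepN split k (pvStep1 split st)

theorem pvStepNAdd (split : List (List String)) (a b : Nat) (st : String × Nat × Nat) :
    pvStepN split (a + b) st = pvStepN split b (pvStepN split a st) := by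
  induction a generalizing st with
  | zero => simp [pvStepN]
  | succ a ih =>
      rw [show a + 1 + b = (a + b) + 1 by omega]
      show pvStepN split (a + b) (pvStep1 split st) = _
      rw [ih]
      rfl

theorem pvFoldlEqStepN (split : List (List String)) (l : List Nat) :
    ∀ st, l.foldl
      (fun (st : String × Nat × Nat) _ =>
        let (s, i, j) := st
        let (i, j) := if i = split.length then (0, j + 1) else (i, j)
        (s ++ ((split.getD i []).getD j ""), i + 1, j)) st
      = pvStepN split l.length st := by
  induction l with
  | nil => intro st; rfl
  | cons x t ih =>
      intro st
      show t.foldl _ (pvStep1 split st) = pvStepN split (t.length + 1) st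
      rw [ih, show t.length + 1 = 1 + t.length by omega, pvStepNAdd]
      rfl

-- running m steps with no reset: row indices i, i+1, …, i+m-1 of column j
theorem pvRunNoReset (split : List (List String)) :
    ∀ (m i j : Nat) (s : String), i + m ≤ split.length →
      pvStepN split m (s, i, j) =
        (s ++ pvColJoin ((split.drop i).take m) j, i + m, j) := by
  intro m
  induction m with
  | zero => intro i j s h; simp [pvStepN, pvColJoin, String.join]
  | succ m ih =>
      intro i j s h
      have hi : i < split.length := by omega
      have hne : ¬ i = split.length := by omega
      show pvStepN split m (pvStep1 split (s, i, j)) = _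
      have h1 : pvStep1 split (s, i, j) = (s ++ ((split.getD i []).getD j ""), i + 1, j) := by
        simp [pvStep1, hne]
      rw [h1, ih (i + 1) j _ (by omega)]
      have hdrop : split.drop i = split[i] :: split.drop (i + 1) :=
        List.drop_eq_getElem_cons hi
      have hget : split.getD i [] = split[i] := List.getD_eq_getElem split [] hi
      rw [hdrop]
      simp only [List.take_succ_cons, pvColJoin, List.map_cons, pvJoinCons, hget,
        String.append_assoc]
      rw [show i + 1 + m = i + (m + 1) by omega]

-- running c full blocks of n steps: the first c columns, ending at state (…, n, c-1)
theorem pvBlocks (split : List (List String)) (hn : 0 < split.length) :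
    ∀ c, 0 < c →
      pvStepN split (c * split.length) ("", 0, 0) =
        (pvCols split c, split.length, c - 1) := by
  intro c
  induction c with
  | zero => intro h; omega
  | succ c ih =>
      intro _
      by_cases hc : c = 0
      · subst hc
        rw [show (0 + 1) * split.length = split.length by ring,
          pvRunNoReset split split.length 0 0 "" (by omega)]
        simp [pvCols]
      · have hc0 : 0 < c := Nat.pos_of_ne_zero hc
        rw [show (c + 1) * split.length = c * split.length + split.length by ring,
          pvStepNAdd, ih hc0,
          show pvStepN split split.length (pvCols split c, split.length, c - 1)
            = pvStepN split (split.length - 1)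
                (pvStepN split 1 (pvCols split c, split.length, c - 1)) from by
              rw [← pvStepNAdd]; congr 1; omega]
        have hstep : pvStepN split 1 (pvCols split c, split.length, c - 1) =
            (pvCols split c ++ ((split.getD 0 []).getD c ""), 1, c) := by
          have hcc : c - 1 + 1 = c := by omega
          simp [pvStepN, pvStep1, hcc]
        rw [hstep, pvRunNoReset split (split.length - 1) 1 c _ (by omega)]
        have htake : (split.drop 1).take (split.length - 1) = split.drop 1 := by
          apply List.take_of_length_le; simp
        refine Prod.ext ?_ (Prod.ext ?_ ?_)
        · show _ = pvCols split (c + 1)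
          rw [pvCols, pvColJoinEq split hn c, htake, pvColJoin, String.append_assoc]
        · simp; omega
        · simp

-- the full run of q*n + r steps, r < n
theorem pvRunFull (split : List (List String)) (hn : 0 < split.length) (q r : Nat)
    (hr : r < split.length) :
    (pvStepN split (q * split.length + r) ("", 0, 0)).1 =
      pvCols split q ++ pvColJoin (split.take r) q := by
  by_cases hq0 : q = 0
  · subst hq0
    rw [Nat.zero_mul, Nat.zero_add, pvRunNoReset split r 0 0 "" (by omega)]
    simp [pvCols]
  · rw [pvStepNAdd, pvBlocks split hn q (Nat.pos_of_ne_zero hq0)]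
    by_cases hr0 : r = 0
    · subst hr0
      simp [pvStepN, pvColJoin, String.join]
    · rw [show pvStepN split r (pvCols split q, split.length, q - 1)
            = pvStepN split (r - 1)
                (pvStepN split 1 (pvCols split q, split.length, q - 1)) from by
          rw [← pvStepNAdd]; congr 1; omega]
      have hstep : pvStepN split 1 (pvCols split q, split.length, q - 1) =
          (pvCols split q ++ ((split.getD 0 []).getD q ""), 1, q) := by
        have hqq : q - 1 + 1 = q := by omega
        simp [pvStepN, pvStep1, hqq]
      rw [hstep, pvRunNoReset split (r - 1) 1 q _ (by omega)]
      show pvCols split q ++ _ ++ _ = _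
      rw [pvTakeCons split hn r (by omega)]
      simp [pvColJoin, pvJoinCons, String.append_assoc]

-- A's result, in canonical column form
theorem pvAEq (split : List (List String)) (hn : 0 < split.length) (q r : Nat)
    (hq : q = (split.flatMap id).length / split.length)
    (hr : r = (split.flatMap id).length % split.length) :
    combine_split split = pvCols split q ++ pvColJoin (split.take r) q := by
  have hA : combine_split split =
      (pvStepN split ((List.range split.length).flatMap (fun i => split.getD i [])).length
        ("", 0, 0)).1 := by
    show ((List.range ((List.range split.length).flatMap (fun i => split.getD i [])).length).foldl
      (fun (st : String × Nat × Nat) _ =>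
        let (s, i, j) := st
        let (i, j) := if i = split.length then (0, j + 1) else (i, j)
        (s ++ ((split.getD i []).getD j ""), i + 1, j)) ("", 0, 0)).1 = _
    rw [pvFoldlEqStepN]
    simp
  rw [hA, pvFlatEq,
    show (split.flatMap id).length = q * split.length + r from by
      rw [hq, hr]; exact (Nat.div_add_mod' _ _).symm]
  exact pvRunFull split hn q r (hr ▸ Nat.mod_lt _ hn)

-- ===== B side =====

-- lengths of the rows, from Pre_
theorem pvPreElem (split : List (List String)) (hpre : Pre_combine_split split) :
    ∀ i (h : i < split.length),
      split[i].length =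
        (split.flatMap id).length / split.length +
          (if i < (split.flatMap id).length % split.length then 1 else 0) := by
  intro i h
  have := hpre i h
  rwa [List.getD_eq_getElem split [] h] at this

theorem pvPreMem (split : List (List String)) (hpre : Pre_combine_split split)
    (x : List String) (hx : x ∈ split) :
    (split.flatMap id).length / split.length ≤ x.length ∧
      x.length ≤ (split.flatMap id).length / split.length +
        (if 0 < (split.flatMap id).length % split.length then 1 else 0) := by
  obtain ⟨i, h, rfl⟩ := List.mem_iff_getElem.mp hx
  rw [pvPreElem split hpre i h]
  constructor <;> split_ifs <;> omega

-- max-fold characterization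
def pvMaxLen (l : List (List String)) : Nat := l.foldr (fun r m => max r.length m) 0

theorem pvFoldlMax (l : List (List String)) :
    ∀ a : Nat, l.foldl (fun m r => max m r.length) a = max a (pvMaxLen l) := by
  induction l with
  | nil => intro a; simp [pvMaxLen]
  | cons x t ih =>
      intro a
      simp only [List.foldl_cons, ih, pvMaxLen, List.foldr_cons]
      omega

theorem pvMaxLenLe (l : List (List String)) (b : Nat)
    (h : ∀ r ∈ l, r.length ≤ b) : pvMaxLen l ≤ b := by
  induction l with
  | nil => simp [pvMaxLen]
  | cons x t ih =>
      simp only [pvMaxLen, List.foldr_cons]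
      have h1 := h x List.mem_cons_self
      have h2 := ih (fun r hr => h r (List.mem_cons_of_mem _ hr))
      simp only [pvMaxLen] at h2
      omega

theorem pvLeMaxLen (l : List (List String)) (r : List String) (h : r ∈ l) :
    r.length ≤ pvMaxLen l := by
  induction l with
  | nil => cases h
  | cons x t ih =>
      rcases List.mem_cons.mp h with h | h
      · subst h; simp [pvMaxLen]
      · have := ih h; simp only [pvMaxLen, List.foldr_cons] at this ⊢; omega

-- width under Pre_
theorem pvWidthEq (split : List (List String)) (hn : 0 < split.length)
    (hpre : Pre_combine_split split) :
    split.foldl (fun m r => max m r.length) 0 =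
      (split.flatMap id).length / split.length +
        (if 0 < (split.flatMap id).length % split.length then 1 else 0) := by
  rw [pvFoldlMax, Nat.max_eq_right (Nat.zero_le _)]
  apply Nat.le_antisymm
  · exact pvMaxLenLe _ _ (fun r hr => (pvPreMem split hpre r hr).2)
  · have h0 := pvPreElem split hpre 0 hn
    rw [← h0]
    exact pvLeMaxLen _ _ (List.getElem_mem hn)

-- a full column keeps every row
theorem pvFilterFull (split : List (List String)) (hpre : Pre_combine_split split)
    (j : Nat) (hj : j < (split.flatMap id).length / split.length) :
    split.filter (fun r => j < r.length) = split := by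
  apply List.filter_eq_self.mpr
  intro x hx
  have := (pvPreMem split hpre x hx).1
  simp only [decide_eq_true_eq]
  omega

-- the partial column keeps exactly the first r rows
theorem pvFilterPartial (split : List (List String)) (hpre : Pre_combine_split split) :
    split.filter
        (fun r => (split.flatMap id).length / split.length < r.length) =
      split.take ((split.flatMap id).length % split.length) := by
  set q := (split.flatMap id).length / split.length with hq
  set r := (split.flatMap id).length % split.length with hr
  conv_lhs => rw [← List.take_append_drop r split]
  rw [List.filter_append]
  have h1 : (split.take r).filter (fun x => decide (q < x.length)) = split.take r := by
    apply List.filter_eq_self.mpr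
    intro x hx
    obtain ⟨i, h, rfl⟩ := List.mem_iff_getElem.mp hx
    have hi : i < split.length := by
      have := h; simp [List.length_take] at this; omega
    have hir : i < r := by
      have := h; simp [List.length_take] at this; omega
    simp only [List.getElem_take, decide_eq_true_eq]
    rw [pvPreElem split hpre i hi, ← hq, ← hr, if_pos hir]
    omega
  have h2 : (split.drop r).filter (fun x => decide (q < x.length)) = [] := by
    apply List.filter_eq_nil_iff.mpr
    intro x hx
    obtain ⟨i, h, rfl⟩ := List.mem_iff_getElem.mp hx
    have hi : r + i < split.length := by
      have := h; simp [List.length_drop] at this; omega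
    simp only [List.getElem_drop, decide_eq_true_eq]
    rw [pvPreElem split hpre (r + i) hi, ← hq, ← hr, if_neg (by omega)]
    omega
  rw [h1, h2, List.append_nil]

-- joined columns of B, up to c
theorem pvJSucc (split : List (List String)) (c : Nat) :
    String.join ((List.range (c + 1)).flatMap (fun j =>
        (split.filter (fun r => j < r.length)).map (fun r => r.getD j ""))) =
      String.join ((List.range c).flatMap (fun j =>
        (split.filter (fun r => j < r.length)).map (fun r => r.getD j ""))) ++
      String.join ((split.filter (fun r => c < r.length)).map (fun r => r.getD c "")) := by
  rw [List.range_succ, List.flatMap_append, pvJoinAppend]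
  simp

theorem pvJCols (split : List (List String)) (hpre : Pre_combine_split split) :
    ∀ c, c ≤ (split.flatMap id).length / split.length →
      String.join ((List.range c).flatMap (fun j =>
          (split.filter (fun r => j < r.length)).map (fun r => r.getD j ""))) =
        pvCols split c := by
  intro c
  induction c with
  | zero => intro _; rfl
  | succ c ih =>
      intro h
      rw [pvJSucc, ih (by omega), pvFilterFull split hpre c (by omega)]
      rfl

-- B's result, in canonical column form, under Pre_
theorem pvBEq (split : List (List String)) (hn : 0 < split.length)
    (hpre : Pre_combine_split split) (q r : Nat)
    (hq : q = (split.flatMap id).length / split.length)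
    (hr : r = (split.flatMap id).length % split.length) :
    combine_split_alt split = pvCols split q ++ pvColJoin (split.take r) q := by
  have hB : combine_split_alt split =
      String.join ((List.range (split.foldl (fun m r => max m r.length) 0)).flatMap (fun j =>
        (split.filter (fun r => j < r.length)).map (fun r => r.getD j ""))) := rfl
  rw [hB, pvWidthEq split hn hpre, ← hq, ← hr]
  by_cases hr0 : r = 0
  · subst hr0
    simp only [Nat.lt_irrefl, if_false, Nat.add_zero]
    rw [pvJCols split hpre q (le_of_eq hq)]
    simp [pvColJoin, String.join]
  · rw [if_pos (by omega)]
    rw [pvJSucc, pvJCols split hpre q (le_of_eq hq)]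
    rw [hq, pvFilterPartial split hpre, ← hq, ← hr]
    rfl

-- ===== VERDICT (by name: the statement is the Claim_ definition above) =====
theorem combine_split_spec : Claim_equal_combine_split := by
  intro split _ hpre
  unfold Spec_combine_split
  by_cases hn : 0 < split.length
  · rw [pvAEq split hn _ _ rfl rfl, pvBEq split hn hpre _ _ rfl rfl]
  · have : split = [] := List.eq_nil_of_length_eq_zero (by omega)
    subst this; rfl
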